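-- pv_equiv track=rewrite | github.com/albertyann/stockTrade | backend/app/services/script_sandbox.py | extract_analysis_function
-- ===== SOURCE A (Python) =====
-- from typing import Dict, Any, List, Tuple, Optional
--
-- def extract_analysis_function(script: str) -> Optional[str]:
--     """提取分析函数"""
--     # 查找 analyze_stocks 函数定义
--     lines = script.split('\n')
--     function_lines = []
--     in_function = False
--     indent_level = None
--
--     for line in lines:
--         if 'def analyze_stocks' in line:
--             in_function = True
--             indent_level = len(line) - len(line.lstrip())
--             function_lines.append(line)
--         elif in_function:
--             current_indent = len(line) - len(line.lstrip())
--             if current_indent <= indent_level and line.strip():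
--                 break
--             function_lines.append(line)
--
--     if function_lines:
--         return '\n'.join(function_lines)
--     return None
-- ===== SOURCE B (Python) =====
-- def extract_analysis_function(script):
--     """提取分析函数 — find the start line and the end boundary, then slice."""
--     lines = script.split('\n')
--     start = next((i for i, l in enumerate(lines) if 'def analyze_stocks' in l), None)
--     if start is None:
--         return None
--     indent = len(lines[start]) - len(lines[start].lstrip())
--     end = next((i for i in range(start + 1, len(lines))
--                 if lines[i].strip() and len(lines[i]) - len(lines[i].lstrip()) <= indent),
--                len(lines))
--     return '\n'.join(lines[start:end])
-- ===== Notes on version B (the rewrite author's own statement) =====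
-- stated objective: simpler
-- what changed: Replaces A's in_function/indent_level state machine with a find-the-start-line, find-the-end-boundary, then slice-and-join decomposition.
import Mathlib
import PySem

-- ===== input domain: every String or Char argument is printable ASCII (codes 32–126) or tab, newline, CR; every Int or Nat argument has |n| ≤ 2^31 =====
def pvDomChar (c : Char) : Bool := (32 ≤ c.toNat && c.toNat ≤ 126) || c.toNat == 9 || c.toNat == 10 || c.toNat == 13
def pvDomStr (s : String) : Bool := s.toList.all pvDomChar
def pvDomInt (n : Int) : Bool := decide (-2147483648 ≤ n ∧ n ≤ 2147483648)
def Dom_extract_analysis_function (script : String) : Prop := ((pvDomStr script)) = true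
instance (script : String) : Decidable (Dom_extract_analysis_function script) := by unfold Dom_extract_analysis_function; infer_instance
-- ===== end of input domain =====

-- B replaces A's in_function/indent_level state machine by find-start-line, find-end-boundary, slice-and-join (objective: simpler).

-- shared helpers: 'def analyze_stocks' in line;  len(line) - len(line.lstrip())
def pvIsDef (l : List Char) : Bool := PySem.Chars.isIn "def analyze_stocks".toList l
def pvIndent (l : List Char) : Int := PySem.Chars.len l - PySem.Chars.len (PySem.Chars.lstrip l)

-- ===== PORT A =====
-- the for-loop over lines with state (function_lines, in_function, indent_level);
-- indent_level starts as Python's None, modelled as 0: the branch reading it only runs after it was set.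
def pvALoop : List (List Char) → List (List Char) → Bool → Int → List (List Char)
  | [], fl, _, _ => fl
  | l :: rest, fl, inF, ind =>
    if pvIsDef l then pvALoop rest (fl ++ [l]) true (pvIndent l)
    else if inF then
      if pvIndent l ≤ ind ∧ PySem.Chars.strip l ≠ [] then fl   -- break
      else pvALoop rest (fl ++ [l]) inF ind
    else pvALoop rest fl inF ind

def extract_analysis_function (script : String) : Option String :=
  let lines := PySem.Chars.splitOn script.toList "\n".toList
  let fl := pvALoop lines [] false 0
  if fl ≠ [] then some (String.ofList (PySem.Chars.join "\n".toList fl)) else none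

-- ===== PORT B =====
-- the generator 'next((i for i in range(start+1, len(lines)) if …), len(lines))': distance to the first boundary line
def pvBEnd : List (List Char) → Int → Nat
  | [], _ => 0
  | l :: rest, ind =>
    if PySem.Chars.strip l ≠ [] ∧ pvIndent l ≤ ind then 0 else pvBEnd rest ind + 1

def extract_analysis_function_alt (script : String) : Option String :=
  let lines := PySem.Chars.splitOn script.toList "\n".toList
  match lines.findIdx? pvIsDef with
  | none => none
  | some s =>
      let ind := pvIndent (lines.getD s [])
      let e := s + 1 + pvBEnd (lines.drop (s + 1)) ind
      some (String.ofList (PySem.Chars.join "\n".toList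
        (PySem.List.slice lines (some (s : Int)) (some (e : Int)))))

-- ===== PRECONDITION & SPEC =====
-- Pre_ excludes scripts in which MORE THAN ONE line contains 'def analyze_stocks': there A resets its
-- indent threshold mid-scan and keeps collecting across the later match — an accidental corner no caller
-- would specify — while B keeps only the first function block.
def Pre_extract_analysis_function (script : String) : Prop :=
  (PySem.Chars.splitOn script.toList "\n".toList).countP pvIsDef ≤ 1
instance (script : String) : Decidable (Pre_extract_analysis_function script) := by
  unfold Pre_extract_analysis_function; infer_instance

def pvWitness_extract_analysis_function : String := "def analyze_stocks():\n    pass\nprint(1)"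

def Spec_extract_analysis_function (script : String) (out : Option String) : Prop := out = extract_analysis_function_alt script
instance (script : String) (out : Option String) : Decidable (Spec_extract_analysis_function script out) := by unfold Spec_extract_analysis_function; infer_instance

-- ===== CLAIM (what is proved, stated in full; the proofs are below) =====
def Claim_equal_extract_analysis_function : Prop := ∀ (script : String), Dom_extract_analysis_function script → Pre_extract_analysis_function script → Spec_extract_analysis_function script (extract_analysis_function script)

-- ===== LEMMAS AND PROOFS =====

-- lines before the first match are skipped by A's loop
lemma pvALoop_skip (pre rest : List (List Char)) (fl : List (List Char)) (ind : Int)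
    (h : ∀ l ∈ pre, pvIsDef l = false) :
    pvALoop (pre ++ rest) fl false ind = pvALoop rest fl false ind := by
  induction pre with
  | nil => rfl
  | cons l pre ih =>
      have hl : pvIsDef l = false := h l (by simp)
      simp [pvALoop, hl, ih fun x hx => h x (by simp [hx])]

-- inside the function, with no further match, A appends exactly the lines before B's boundary
lemma pvALoop_in (rest : List (List Char)) (fl : List (List Char)) (ind : Int)
    (h : ∀ l ∈ rest, pvIsDef l = false) :
    pvALoop rest fl true ind = fl ++ rest.take (pvBEnd rest ind) := by
  induction rest generalizing fl with
  | nil => simp [pvALoop, pvBEnd]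
  | cons l rest ih =>
      have hl : pvIsDef l = false := h l (by simp)
      by_cases hb : PySem.Chars.strip l ≠ [] ∧ pvIndent l ≤ ind
      · simp [pvALoop, pvBEnd, hl, hb.1, hb.2]
      · have hb' : ¬ (pvIndent l ≤ ind ∧ PySem.Chars.strip l ≠ []) := fun hc => hb ⟨hc.2, hc.1⟩
        simp only [pvALoop, pvBEnd, hl, Bool.false_eq_true, if_false, if_neg hb', if_neg hb]
        rw [ih _ (fun x hx => h x (List.mem_cons_of_mem _ hx))]
        simp

-- ===== VERDICT (by name: the statement is the Claim_ definition above) =====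
theorem extract_analysis_function_spec : Claim_equal_extract_analysis_function := by
  intro script _ hpre
  unfold Spec_extract_analysis_function extract_analysis_function extract_analysis_function_alt
  set lines := PySem.Chars.splitOn script.toList "\n".toList with hlines
  cases hf : lines.findIdx? pvIsDef with
  | none =>
      have hall : ∀ l ∈ lines, pvIsDef l = false := by
        intro l hl
        simpa using List.findIdx?_eq_none_iff.mp hf l hl
      have hA : pvALoop lines [] false 0 = [] := by
        simpa using pvALoop_skip lines [] [] 0 hall
      simp [hf, hA]
  | some s =>
      obtain ⟨hs, hm, hb⟩ := List.findIdx?_eq_some_iff_getElem.mp hf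
      set m := lines[s] with hmdef
      set rest := lines.drop (s + 1) with hrdef
      have hsplit : lines.take s ++ m :: rest = lines := by
        rw [hmdef, hrdef, ← List.drop_eq_getElem_cons hs, List.take_append_drop]
      have hpretake : ∀ x ∈ lines.take s, pvIsDef x = false := by
        intro x hx
        obtain ⟨j, hj, hxe⟩ := List.getElem_of_mem hx
        have hjs : j < s := by simp at hj; omega
        have hfalse := hb j hjs
        rw [← hxe]
        simp only [List.getElem_take]
        exact Bool.eq_false_iff.mpr (by simpa using hfalse)
      have hrest0 : ∀ x ∈ rest, pvIsDef x = false := by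
        have h1 : lines.countP pvIsDef ≤ 1 := hpre
        rw [← hsplit] at h1
        simp [List.countP_append, hm] at h1
        have hz : rest.countP pvIsDef = 0 := by omega
        intro x hx
        exact Bool.eq_false_iff.mpr (List.countP_eq_zero.mp hz x hx)
      have hA : pvALoop lines [] false 0 = m :: rest.take (pvBEnd rest (pvIndent m)) := by
        conv_lhs => rw [← hsplit]
        rw [pvALoop_skip _ _ _ _ hpretake]
        show pvALoop (m :: rest) [] false 0 = _
        rw [pvALoop, if_pos hm, pvALoop_in rest _ _ hrest0]
        rfl
      have hget : lines[s]?.getD [] = m := by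
        simp [List.getElem?_eq_getElem hs]
        exact hmdef.symm
      have hslice : PySem.List.slice lines (some (s : Int))
          (some ((s + 1 + pvBEnd rest (pvIndent m) : Nat) : Int))
          = m :: rest.take (pvBEnd rest (pvIndent m)) := by
        rw [PySem.List.slice_natCast]
        have h2 : s + 1 + pvBEnd rest (pvIndent m) - s = pvBEnd rest (pvIndent m) + 1 := by omega
        rw [h2, show lines.drop s = m :: rest from by
          rw [hmdef, hrdef, ← List.drop_eq_getElem_cons hs]]
        exact List.take_succ_cons
      simp only [hf, hA, List.getD, hget, ← hrdef, hslice]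
      simp
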